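-- pv_equiv track=rewrite | github.com/gdemerges/simplon_exercices | 01_Prairie/cul_de_chouette.py | trouver_solutions_des
-- ===== SOURCE A (Python) =====
-- def trouver_solutions_des(valeur_cible):
--     solutions = set()
--     for de1 in range(1, 7):
--         for de2 in range(1, 7):
--             for de3 in range(1, 7):
--                 if de1 + de2 + de3 == valeur_cible:
--                     solution = tuple(sorted([de1, de2, de3]))
--                     solutions.add(solution)
--     return solutions
-- ===== SOURCE B (Python) =====
-- def trouver_solutions_des(valeur_cible):
--     solutions = set()
--     for de1 in range(1, 7):
--         for de2 in range(de1, 7):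
--             de3 = valeur_cible - de1 - de2
--             if de2 <= de3 <= 6:
--                 solutions.add((de1, de2, de3))
--     return solutions
-- ===== Notes on version B (the rewrite author's own statement) =====
-- stated objective: simpler
-- what changed: replaces the triple nested 6x6x6 loop with sort-and-dedup by two non-decreasing loops over de1<=de2 that compute de3 = valeur_cible - de1 - de2 directly, so each sorted triple is generated exactly once and neither sorted() nor deduplication work is needed
import Mathlib
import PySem

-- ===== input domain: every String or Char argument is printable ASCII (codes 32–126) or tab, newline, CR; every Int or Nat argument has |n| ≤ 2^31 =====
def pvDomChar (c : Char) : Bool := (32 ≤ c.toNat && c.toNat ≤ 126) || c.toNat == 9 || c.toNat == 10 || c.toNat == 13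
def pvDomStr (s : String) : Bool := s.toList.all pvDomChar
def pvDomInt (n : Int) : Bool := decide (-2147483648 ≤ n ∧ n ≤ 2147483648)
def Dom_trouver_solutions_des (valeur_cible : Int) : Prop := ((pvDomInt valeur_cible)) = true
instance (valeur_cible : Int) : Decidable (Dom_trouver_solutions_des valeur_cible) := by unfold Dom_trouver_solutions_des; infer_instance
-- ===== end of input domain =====

-- B drops the third nested loop, the sorted() call and the dedup: de3 is computed as
-- valeur_cible - de1 - de2 over non-decreasing de1 <= de2, producing each sorted triple once (objective: simpler).

-- ===== PORT A =====
def trouver_solutions_des (valeur_cible : Int) : List (Int × Int × Int) :=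
  (PySem.List.pyRange 1 7 1).foldl (fun sols de1 =>
    (PySem.List.pyRange 1 7 1).foldl (fun sols de2 =>
      (PySem.List.pyRange 1 7 1).foldl (fun sols de3 =>
        if de1 + de2 + de3 = valeur_cible then
          -- tuple(sorted([de1, de2, de3])): the sorted 3-element list rebuilt as a tuple
          -- (exact: sorted preserves length, so the first match arm always fires)
          PySem.Set.add sols
            (match PySem.List.sorted [de1, de2, de3] (fun x => x) false with
             | [a, b, c] => (a, b, c)
             | _ => (0, 0, 0))
        else sols) sols) sols) PySem.Set.empty

-- ===== PORT B =====
def trouver_solutions_des_alt (valeur_cible : Int) : List (Int × Int × Int) :=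
  (PySem.List.pyRange 1 7 1).foldl (fun sols de1 =>
    (PySem.List.pyRange de1 7 1).foldl (fun sols de2 =>
      let de3 := valeur_cible - de1 - de2
      if de2 ≤ de3 ∧ de3 ≤ 6 then PySem.Set.add sols (de1, de2, de3) else sols) sols)
    PySem.Set.empty

-- ===== PRECONDITION & SPEC =====
def Spec_trouver_solutions_des (valeur_cible : Int) (out : List (Int × Int × Int)) : Prop := out = trouver_solutions_des_alt valeur_cible
instance (valeur_cible : Int) (out : List (Int × Int × Int)) : Decidable (Spec_trouver_solutions_des valeur_cible out) := by unfold Spec_trouver_solutions_des; infer_instance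

-- ===== CLAIM (what is proved, stated in full; the proofs are below) =====
def Claim_equal_trouver_solutions_des : Prop := ∀ (valeur_cible : Int), Dom_trouver_solutions_des valeur_cible → Spec_trouver_solutions_des valeur_cible (trouver_solutions_des valeur_cible)

-- ===== LEMMAS AND PROOFS =====

-- a fold whose step fixes the accumulator on every list member is the identity
theorem pv_foldl_id {α β : Type} (l : List β) (f : α → β → α)
    (h : ∀ s b, b ∈ l → f s b = s) : ∀ s, l.foldl f s = s := by
  induction l with
  | nil => intro s; rfl
  | cons x xs ih =>
      intro s
      rw [List.foldl_cons, h s x (by simp)]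
      exact ih (fun s b hb => h s b (by simp [hb])) s

theorem pv_A_empty (v : Int) (hv : v < 3 ∨ 18 < v) : trouver_solutions_des v = [] := by
  unfold trouver_solutions_des
  refine pv_foldl_id _ _ (fun s de1 h1 => ?_) _
  refine pv_foldl_id _ _ (fun s de2 h2 => ?_) _
  refine pv_foldl_id _ _ (fun s de3 h3 => ?_) _
  rw [PySem.List.mem_pyRange_one] at h1 h2 h3
  rw [if_neg (by omega)]

theorem pv_B_empty (v : Int) (hv : v < 3 ∨ 18 < v) : trouver_solutions_des_alt v = [] := by
  unfold trouver_solutions_des_alt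
  refine pv_foldl_id _ _ (fun s de1 h1 => ?_) _
  refine pv_foldl_id _ _ (fun s de2 h2 => ?_) _
  rw [PySem.List.mem_pyRange_one] at h1 h2
  rw [if_neg (by omega)]

-- ===== VERDICT (by name: the statement is the Claim_ definition above) =====
set_option maxRecDepth 40000 in
theorem trouver_solutions_des_spec : Claim_equal_trouver_solutions_des := by
  intro v _
  unfold Spec_trouver_solutions_des
  by_cases h : 3 ≤ v ∧ v ≤ 18
  · obtain ⟨h1, h2⟩ := h
    interval_cases v <;> decide
  · rw [pv_A_empty v (by omega), pv_B_empty v (by omega)]
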